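-- pv_equiv track=rewrite | github.com/yasidew/Codeharbor-2.0 | Drinks/complexity_calculator_csharp.py | aggregate_method_metrics_csharp
-- ===== SOURCE A (Python) =====
-- def aggregate_method_metrics_csharp(method_lines):
--     """
--     Aggregate the per-line metrics of a C# method and re-calculate the overall method complexity
--     using Option A.
--
--     For Option A on a per-line basis:
--       line_wcc_i = S_i * (CS_i + N_i + I_i + CC_i + TC_i + TH_i + (CBO_i - L_i))
--     (We assume the 'cbo_weights' field already includes any offset for loose coupling if needed.)
--
--     We calculate:
--       - total_size = sum(S_i)
--       - weighted_sum = sum( S_i * (CS_i + N_i + I_i + CC_i + TC_i + TH_i + cbo_weights) )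
--       - weighted_average = weighted_sum / total_size
--       - total_complexity_option_a = total_size * weighted_average
--
--     Additionally, we sum the precomputed per-line 'line_wcc' values for reference.
--
--     :param method_lines: List of per-line complexity dictionaries for the method.
--     :return: Dictionary with aggregated metrics including total complexity computed via Option A.
--     """
--     total_size = sum(entry.get("size", 0) for entry in method_lines)
--
--     # Sum over each line: size * (CS + N + I + CC + TC + TH + cbo_weights)
--     weighted_sum = sum(
--         entry.get("size", 0) * (
--                 entry.get("control_structure_complexity", 0) +
--                 entry.get("nesting_level", 0) +
--                 entry.get("inheritance_level", 0) +
--                 entry.get("compound_condition_weight", 0) +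
--                 entry.get("try_catch_weight", 0) +
--                 entry.get("thread_weight", 0) +
--                 entry.get("cbo_weights", 0)
--         )
--         for entry in method_lines
--     )
--
--     # Weighted average of the inner sum.
--     if total_size > 0:
--         weighted_average = weighted_sum / total_size
--     else:
--         weighted_average = 0
--
--     # Total complexity (Option A) for the method.
--     total_complexity_option_a = total_size * weighted_average
--
--     # Also sum the per-line precomputed complexity values (line_wcc).
--     total_line_wcc = sum(entry.get("line_wcc", 0) for entry in method_lines)
--
--     # Return aggregated metrics.
--     return {
--         "size": total_size,
--         "control_structure_complexity": sum(entry.get("control_structure_complexity", 0) for entry in method_lines),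
--         "nesting_level": sum(entry.get("nesting_level", 0) for entry in method_lines),
--         "inheritance_level": sum(entry.get("inheritance_level", 0) for entry in method_lines),
--         "compound_condition_weight": sum(entry.get("compound_condition_weight", 0) for entry in method_lines),
--         "try_catch_weight": sum(entry.get("try_catch_weight", 0) for entry in method_lines),
--         "thread_weight": sum(entry.get("thread_weight", 0) for entry in method_lines),
--         "cbo_weights": sum(entry.get("cbo_weights", 0) for entry in method_lines),
--         "total_complexity": total_line_wcc,
--         # "total_line_wcc": total_line_wcc
--     }
-- ===== SOURCE B (Python) =====
-- def aggregate_method_metrics_csharp(method_lines):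
--     # single pass: one loop accumulating all nine fields at once
--     s = cs = nl = il = cw = tw = th = cbo = wcc = 0
--     for entry in method_lines:
--         s += entry.get("size", 0)
--         cs += entry.get("control_structure_complexity", 0)
--         nl += entry.get("nesting_level", 0)
--         il += entry.get("inheritance_level", 0)
--         cw += entry.get("compound_condition_weight", 0)
--         tw += entry.get("try_catch_weight", 0)
--         th += entry.get("thread_weight", 0)
--         cbo += entry.get("cbo_weights", 0)
--         wcc += entry.get("line_wcc", 0)
--     return {
--         "size": s,
--         "control_structure_complexity": cs,
--         "nesting_level": nl,
--         "inheritance_level": il,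
--         "compound_condition_weight": cw,
--         "try_catch_weight": tw,
--         "thread_weight": th,
--         "cbo_weights": cbo,
--         "total_complexity": wcc,
--     }
-- ===== Notes on version B (the rewrite author's own statement) =====
-- stated objective: simpler
-- what changed: Replaced A's ten independent sum-generator passes (plus unused weighted_sum/weighted_average intermediates) by a single loop over method_lines accumulating all nine fields at once.
import Mathlib
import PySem

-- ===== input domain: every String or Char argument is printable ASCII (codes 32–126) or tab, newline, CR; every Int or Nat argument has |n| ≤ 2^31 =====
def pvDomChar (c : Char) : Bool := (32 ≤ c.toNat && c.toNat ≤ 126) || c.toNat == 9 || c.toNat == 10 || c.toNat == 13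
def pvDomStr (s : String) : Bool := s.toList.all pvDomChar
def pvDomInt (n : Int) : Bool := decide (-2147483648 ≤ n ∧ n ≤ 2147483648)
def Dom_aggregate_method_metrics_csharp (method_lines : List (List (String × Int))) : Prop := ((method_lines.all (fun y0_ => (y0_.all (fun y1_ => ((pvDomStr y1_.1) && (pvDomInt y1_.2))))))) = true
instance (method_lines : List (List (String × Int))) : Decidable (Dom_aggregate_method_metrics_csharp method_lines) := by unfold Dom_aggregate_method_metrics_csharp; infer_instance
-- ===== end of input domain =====

-- B replaces A's ten independent sum-passes (and unused float intermediates) by one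
-- loop accumulating all nine fields at once (objective: simpler, single pass).

-- ===== PORT A =====
-- entry.get(key, 0)
def pvGet0 (entry : List (String × Int)) (key : String) : Int :=
  PySem.Dict.getD (PySem.Dict.mk entry) key 0

-- sum(entry.get(key, 0) for entry in method_lines): one generator pass per field
def pvSumField (method_lines : List (List (String × Int))) (key : String) : Int :=
  method_lines.foldl (fun acc entry => acc + pvGet0 entry key) 0

def aggregate_method_metrics_csharp (method_lines : List (List (String × Int))) : List (String × Int) :=
  let total_size := pvSumField method_lines "size"
  let _weighted_sum := method_lines.foldl (fun acc entry =>
      acc + pvGet0 entry "size" * (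
          pvGet0 entry "control_structure_complexity" +
          pvGet0 entry "nesting_level" +
          pvGet0 entry "inheritance_level" +
          pvGet0 entry "compound_condition_weight" +
          pvGet0 entry "try_catch_weight" +
          pvGet0 entry "thread_weight" +
          pvGet0 entry "cbo_weights")) 0
  -- weighted_average and total_complexity_option_a are float intermediates in A
  -- that do not contribute to the returned dict; they are not modelled.
  let total_line_wcc := pvSumField method_lines "line_wcc"
  [("size", total_size),
   ("control_structure_complexity", pvSumField method_lines "control_structure_complexity"),
   ("nesting_level", pvSumField method_lines "nesting_level"),
   ("inheritance_level", pvSumField method_lines "inheritance_level"),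
   ("compound_condition_weight", pvSumField method_lines "compound_condition_weight"),
   ("try_catch_weight", pvSumField method_lines "try_catch_weight"),
   ("thread_weight", pvSumField method_lines "thread_weight"),
   ("cbo_weights", pvSumField method_lines "cbo_weights"),
   ("total_complexity", total_line_wcc)]

-- ===== PORT B =====
-- single pass: the nine accumulators of Source B's loop as a 9-tuple
def pvAcc := Int × Int × Int × Int × Int × Int × Int × Int × Int

def pvStep (a : pvAcc) (entry : List (String × Int)) : pvAcc :=
  (a.1 + pvGet0 entry "size",
   a.2.1 + pvGet0 entry "control_structure_complexity",
   a.2.2.1 + pvGet0 entry "nesting_level",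
   a.2.2.2.1 + pvGet0 entry "inheritance_level",
   a.2.2.2.2.1 + pvGet0 entry "compound_condition_weight",
   a.2.2.2.2.2.1 + pvGet0 entry "try_catch_weight",
   a.2.2.2.2.2.2.1 + pvGet0 entry "thread_weight",
   a.2.2.2.2.2.2.2.1 + pvGet0 entry "cbo_weights",
   a.2.2.2.2.2.2.2.2 + pvGet0 entry "line_wcc")

def aggregate_method_metrics_csharp_alt (method_lines : List (List (String × Int))) : List (String × Int) :=
  let t := method_lines.foldl pvStep ((0, 0, 0, 0, 0, 0, 0, 0, 0) : pvAcc)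
  [("size", t.1),
   ("control_structure_complexity", t.2.1),
   ("nesting_level", t.2.2.1),
   ("inheritance_level", t.2.2.2.1),
   ("compound_condition_weight", t.2.2.2.2.1),
   ("try_catch_weight", t.2.2.2.2.2.1),
   ("thread_weight", t.2.2.2.2.2.2.1),
   ("cbo_weights", t.2.2.2.2.2.2.2.1),
   ("total_complexity", t.2.2.2.2.2.2.2.2)]

-- ===== PRECONDITION & SPEC =====
def Spec_aggregate_method_metrics_csharp (method_lines : List (List (String × Int))) (out : List (String × Int)) : Prop := out = aggregate_method_metrics_csharp_alt method_lines
instance (method_lines : List (List (String × Int))) (out : List (String × Int)) : Decidable (Spec_aggregate_method_metrics_csharp method_lines out) := by unfold Spec_aggregate_method_metrics_csharp; infer_instance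

-- ===== CLAIM (what is proved, stated in full; the proofs are below) =====
def Claim_equal_aggregate_method_metrics_csharp : Prop := ∀ (method_lines : List (List (String × Int))), Dom_aggregate_method_metrics_csharp method_lines → Spec_aggregate_method_metrics_csharp method_lines (aggregate_method_metrics_csharp method_lines)

-- ===== LEMMAS AND PROOFS =====
theorem pvSumField_cons (e : List (String × Int)) (xs : List (List (String × Int))) (k : String) :
    pvSumField (e :: xs) k = pvGet0 e k + pvSumField xs k := by
  simp [pvSumField, PySem.List.foldl_add]

theorem pvFold_eq (xs : List (List (String × Int))) : ∀ a : pvAcc,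
    xs.foldl pvStep a =
      (a.1 + pvSumField xs "size",
       a.2.1 + pvSumField xs "control_structure_complexity",
       a.2.2.1 + pvSumField xs "nesting_level",
       a.2.2.2.1 + pvSumField xs "inheritance_level",
       a.2.2.2.2.1 + pvSumField xs "compound_condition_weight",
       a.2.2.2.2.2.1 + pvSumField xs "try_catch_weight",
       a.2.2.2.2.2.2.1 + pvSumField xs "thread_weight",
       a.2.2.2.2.2.2.2.1 + pvSumField xs "cbo_weights",
       a.2.2.2.2.2.2.2.2 + pvSumField xs "line_wcc") := by
  induction xs with
  | nil => intro a; simp [pvSumField]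
  | cons e xs ih =>
    intro a
    rw [List.foldl_cons, ih, pvSumField_cons, pvSumField_cons, pvSumField_cons,
        pvSumField_cons, pvSumField_cons, pvSumField_cons, pvSumField_cons,
        pvSumField_cons, pvSumField_cons]
    simp only [pvStep]
    refine Prod.ext (by ring) (Prod.ext (by ring) (Prod.ext (by ring) (Prod.ext (by ring)
      (Prod.ext (by ring) (Prod.ext (by ring) (Prod.ext (by ring) (Prod.ext (by ring) (by ring))))))))

-- ===== VERDICT (by name: the statement is the Claim_ definition above) =====
theorem aggregate_method_metrics_csharp_spec : Claim_equal_aggregate_method_metrics_csharp := by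
  intro xs _
  show _ = _
  simp [aggregate_method_metrics_csharp, aggregate_method_metrics_csharp_alt, pvFold_eq]
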